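-- pv_equiv track=rewrite | github.com/mariamafra/VQEDA_TP2 | Q7.py | count_pedidos_impares
-- ===== SOURCE A (Python) =====
-- def count_pedidos_impares(pilha_pedidos):
--     contador_impares = 0
--     pilha_auxiliar = []
--
--     while pilha_pedidos:
--         pedido = pilha_pedidos.pop()
--         if pedido % 2 == 0:
--             contador_impares += 1
--         pilha_auxiliar.append(pedido)
--
--     while pilha_auxiliar:
--         pilha_pedidos.append(pilha_auxiliar.pop())
--
--     return contador_impares
-- ===== SOURCE B (Python) =====
-- def count_pedidos_impares(pilha_pedidos):
--     return sum(1 for x in pilha_pedidos if x % 2 == 0)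
-- ===== Notes on version B (the rewrite author's own statement) =====
-- stated objective: simpler
-- what changed: Replaced the destructive pop/count/restore two-phase loop with an auxiliary stack by a single non-destructive counting pass (sum over a generator); no auxiliary container and no mutation of the input.
import Mathlib
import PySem

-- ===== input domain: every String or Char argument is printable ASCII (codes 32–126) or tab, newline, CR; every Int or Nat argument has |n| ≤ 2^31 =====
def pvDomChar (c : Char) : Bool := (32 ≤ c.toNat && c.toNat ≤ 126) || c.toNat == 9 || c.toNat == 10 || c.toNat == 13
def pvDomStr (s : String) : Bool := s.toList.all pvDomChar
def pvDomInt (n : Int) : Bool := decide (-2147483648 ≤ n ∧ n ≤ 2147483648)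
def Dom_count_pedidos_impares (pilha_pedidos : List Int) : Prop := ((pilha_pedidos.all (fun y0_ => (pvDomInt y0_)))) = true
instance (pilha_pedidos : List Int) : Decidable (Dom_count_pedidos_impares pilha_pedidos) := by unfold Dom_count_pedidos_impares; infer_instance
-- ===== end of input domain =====

-- ===== PORT A =====
-- B replaces A's destructive pop/count/restore loops (auxiliary stack) by one
-- non-destructive counting pass; equivalence is about the return value (A's
-- mutation nets out: the stack is restored to its original contents).
-- A's first while loop: pop from the top (end of the list), count evens, push onto aux.
def count_pedidos_impares_loop : List Int → List Int → Int → Int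
  | [], _aux, contador => contador
  | p :: ps, aux, contador =>
      let pedido := (p :: ps).getLast (by simp)
      let contador' := if PySem.Int.mod pedido 2 = 0 then contador + 1 else contador
      count_pedidos_impares_loop (p :: ps).dropLast (aux ++ [pedido]) contador'
  termination_by pilha _ _ => pilha.length
  decreasing_by simp [List.length_dropLast]

-- (the second while loop only restores pilha_pedidos and does not touch the return value)
def count_pedidos_impares (pilha_pedidos : List Int) : Int :=
  count_pedidos_impares_loop pilha_pedidos [] 0

-- ===== PORT B =====
def count_pedidos_impares_alt (pilha_pedidos : List Int) : Int :=
  ((pilha_pedidos.countP (fun x => PySem.Int.mod x 2 = 0)) : Int)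

-- ===== PRECONDITION & SPEC =====
def Spec_count_pedidos_impares (pilha_pedidos : List Int) (out : Int) : Prop := out = count_pedidos_impares_alt pilha_pedidos
instance (pilha_pedidos : List Int) (out : Int) : Decidable (Spec_count_pedidos_impares pilha_pedidos out) := by unfold Spec_count_pedidos_impares; infer_instance

-- ===== CLAIM (what is proved, stated in full; the proofs are below) =====
def Claim_equal_count_pedidos_impares : Prop := ∀ (pilha_pedidos : List Int), Dom_count_pedidos_impares pilha_pedidos → Spec_count_pedidos_impares pilha_pedidos (count_pedidos_impares pilha_pedidos)

-- ===== LEMMAS AND PROOFS =====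
theorem count_loop_concat (ys : List Int) (x : Int) (aux : List Int) (c : Int) :
    count_pedidos_impares_loop (ys ++ [x]) aux c =
      count_pedidos_impares_loop ys (aux ++ [x])
        (if PySem.Int.mod x 2 = 0 then c + 1 else c) := by
  cases ys with
  | nil => simp [count_pedidos_impares_loop]
  | cons a as =>
      rw [show (a :: as) ++ [x] = a :: (as ++ [x]) from rfl]
      rw [count_pedidos_impares_loop]
      have h1 : (a :: (as ++ [x])).dropLast = a :: as := by
        simpa using List.dropLast_concat (l₁ := a :: as) (b := x)
      have h2 : (a :: (as ++ [x])).getLast (by simp) = x := by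
        simpa using List.getLast_concat (l := a :: as) (a := x)
      simp only [h1, h2]

theorem count_loop_eq (pilha : List Int) : ∀ (aux : List Int) (c : Int),
    count_pedidos_impares_loop pilha aux c =
      c + ((pilha.countP (fun x => PySem.Int.mod x 2 = 0)) : Int) := by
  induction pilha using List.reverseRecOn with
  | nil => intro aux c; simp [count_pedidos_impares_loop]
  | append_singleton ys x ih =>
      intro aux c
      rw [count_loop_concat, ih]
      simp only [List.countP_append, List.countP_cons, List.countP_nil, decide_eq_true_eq]
      split_ifs <;> push_cast <;> ring

-- ===== VERDICT (by name: the statement is the Claim_ definition above) =====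
theorem count_pedidos_impares_spec : Claim_equal_count_pedidos_impares := by
  intro pilha _
  unfold Spec_count_pedidos_impares count_pedidos_impares count_pedidos_impares_alt
  simpa using count_loop_eq pilha [] 0
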